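-- pv_equiv track=rewrite | github.com/chulsea/TIL | algorithm/Python/algorithm/swexport/d3/osello.py | solution
-- ===== SOURCE A (Python) =====
-- dy = [-1, -1, -1, 0, 0, 1, 1, 1]
--
-- dx = [-1, 0, 1, -1, 1, -1, 0, 1]
--
-- def __board_init(n):
--     base = [(n//2, n//2), (n//2-1, n//2-1),
--             (n//2-1, n//2), (n//2, n//2-1)]
--     board = [[0] * n for _ in range(n)]
--     for idx, (y, x) in enumerate(base):
--         if idx < 2:
--             board[y][x] = 2
--         else:
--             board[y][x] = 1
--     return board
--
-- def __cal_stone(board):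
--     w = b = 0
--     n = len(board)
--     for y in range(n):
--         for x in range(n):
--             if board[y][x] == 1:
--                 w += 1
--             elif board[y][x] == 2:
--                 b += 1
--     return w, b
--
-- def __is_out(n, x, y):
--     return 0 <= y < n and 0 <= x < n
--
-- def solution(n, plays):
--     board = __board_init(n)
--     for x, y, s in plays:
--         board[y-1][x-1] = s
--         k = 2 if s == 1 else 1
--         for i in range(8):
--             ny = y + dy[i] - 1
--             nx = x + dx[i] - 1
--             stack = []
--             while __is_out(n, nx, ny) and board[ny][nx] == k:
--                 stack.append((ny, nx))
--                 ny += dy[i]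
--                 nx += dx[i]
--             if __is_out(n, nx, ny) and board[ny][nx] == s:
--                 while stack:
--                     ty, tx = stack.pop()
--                     board[ty][tx] = s
--     return __cal_stone(board)
-- ===== SOURCE B (Python) =====
-- def solution(n, plays):
--     board = [[0] * n for _ in range(n)]
--     h = n // 2
--     board[h][h] = board[h - 1][h - 1] = 2
--     board[h - 1][h] = board[h][h - 1] = 1
--
--     def chain(y, x, dy, dx, s, k):
--         """True iff from (y,x) a run of opponent stones k is closed by an s stone;
--         flips that run cell by cell while the recursion unwinds."""
--         if not (0 <= y < n and 0 <= x < n):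
--             return False
--         c = board[y][x]
--         if c == s:
--             return True
--         if c == k and chain(y + dy, x + dx, dy, dx, s, k):
--             board[y][x] = s
--             return True
--         return False
--
--     for x, y, s in plays:
--         board[y - 1][x - 1] = s
--         k = 2 if s == 1 else 1
--         for dy in (-1, 0, 1):
--             for dx in (-1, 0, 1):
--                 if dy or dx:
--                     chain(y - 1 + dy, x - 1 + dx, dy, dx, s, k)
--
--     flat = [c for row in board for c in row]
--     return flat.count(1), flat.count(2)
-- ===== Notes on version B (the rewrite author's own statement) =====
-- stated objective: alternative
-- what changed: Replaces A's iterative scan that pushes opponent coordinates on a stack and pops it to flip with a recursive probe that walks the ray once and flips the captured run while the recursion unwinds (no stored positions, no second pass), nests dy/dx loops over (-1,0,1) instead of indexing two offset arrays, inlines the board setup as four direct assignments, and counts the final stones on the flattened board instead of A's doubly indexed range scan.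
import Mathlib
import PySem

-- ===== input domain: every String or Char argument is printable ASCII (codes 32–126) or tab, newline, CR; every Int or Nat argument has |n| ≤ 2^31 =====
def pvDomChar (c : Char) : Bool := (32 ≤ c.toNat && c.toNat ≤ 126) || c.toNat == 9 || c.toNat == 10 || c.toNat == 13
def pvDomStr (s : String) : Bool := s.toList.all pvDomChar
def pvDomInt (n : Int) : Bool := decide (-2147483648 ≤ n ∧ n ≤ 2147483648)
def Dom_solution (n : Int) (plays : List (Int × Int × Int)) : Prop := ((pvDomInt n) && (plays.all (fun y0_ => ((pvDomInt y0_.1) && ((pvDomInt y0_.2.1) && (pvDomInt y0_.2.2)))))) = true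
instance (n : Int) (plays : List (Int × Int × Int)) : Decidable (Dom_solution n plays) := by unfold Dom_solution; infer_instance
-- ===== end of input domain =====

-- B replaces A's explicit per-direction coordinate stack with a recursive probe that flips
-- the captured run while the recursion unwinds, nests dy/dx loops instead of indexing two
-- offset arrays, and counts the final stones on the flattened board (objective: alternative;
-- A mutates no caller-visible data, both rebuild the board locally).

-- Shared subscript primitives: both Pythons write/read cells as board[y][x] (Python index
-- semantics: negative index wraps; pySetD/pyGetD are used only where Pre_/the guards keep the
-- index in Python's accepted range).
def pvGetCell (bd : List (List Int)) (y x : Int) : Int :=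
  PySem.List.pyGetD (PySem.List.pyGetD bd y []) x 0

def pvSetCell (bd : List (List Int)) (y x : Int) (v : Int) : List (List Int) :=
  PySem.List.pySetD bd y (PySem.List.pySetD (PySem.List.pyGetD bd y []) x v)

-- ===== PORT A =====
def pvDy : List Int := [-1, -1, -1, 0, 0, 1, 1, 1]
def pvDx : List Int := [-1, 0, 1, -1, 1, -1, 0, 1]

def pvBoardInit (n : Int) : List (List Int) :=
  let h := PySem.Int.floordiv n 2
  let base : List (Int × Int) := [(h, h), (h - 1, h - 1), (h - 1, h), (h, h - 1)]
  let board := (PySem.List.pyRange 0 n 1).map (fun _ => PySem.List.pyRepeat [(0 : Int)] n)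
  (PySem.List.enumerate base).foldl
    (fun bd iyx => if iyx.1 < 2 then pvSetCell bd iyx.2.1 iyx.2.2 2
                   else pvSetCell bd iyx.2.1 iyx.2.2 1) board

def pvCalStone (bd : List (List Int)) : Int × Int :=
  let m := PySem.List.len bd
  (PySem.List.pyRange 0 m 1).foldl (fun wb y =>
    (PySem.List.pyRange 0 m 1).foldl (fun wb x =>
      if pvGetCell bd y x == 1 then (wb.1 + 1, wb.2)
      else if pvGetCell bd y x == 2 then (wb.1, wb.2 + 1)
      else wb) wb) ((0 : Int), (0 : Int))

def pvIsOut (n x y : Int) : Bool :=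
  decide (0 ≤ y ∧ y < n) && decide (0 ≤ x ∧ x < n)

-- the while-loop of A: push each opponent stone's coordinates; fuel n+1 bounds the ≤ n steps
def pvWalkA (fuel : Nat) (n : Int) (bd : List (List Int)) (k ny nx dy dx : Int)
    (stack : List (Int × Int)) : List (Int × Int) × Int × Int :=
  match fuel with
  | 0 => (stack, ny, nx)
  | f + 1 =>
    if pvIsOut n nx ny && (pvGetCell bd ny nx == k) then
      pvWalkA f n bd k (ny + dy) (nx + dx) dy dx (stack ++ [(ny, nx)])
    else (stack, ny, nx)

-- body of A's 'for i in range(8)' loop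
def pvDirA (n k y x s : Int) (bd : List (List Int)) (dy dx : Int) : List (List Int) :=
  let r := pvWalkA (n.toNat + 1) n bd k (y + dy - 1) (x + dx - 1) dy dx []
  if pvIsOut n r.2.2 r.2.1 && (pvGetCell bd r.2.1 r.2.2 == s) then
    r.1.reverse.foldl (fun b p => pvSetCell b p.1 p.2 s) bd
  else bd

def pvPlayA (n : Int) (bd : List (List Int)) (x y s : Int) : List (List Int) :=
  let bd := pvSetCell bd (y - 1) (x - 1) s
  let k : Int := if s == 1 then 2 else 1
  (PySem.List.pyRange 0 8 1).foldl
    (fun bd i => pvDirA n k y x s bd (PySem.List.pyGetD pvDy i 0) (PySem.List.pyGetD pvDx i 0)) bd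

def solution (n : Int) (plays : List (Int × Int × Int)) : Int × Int :=
  pvCalStone (plays.foldl (fun bd p => pvPlayA n bd p.1 p.2.1 p.2.2) (pvBoardInit n))

-- ===== PORT B =====
def pvBoardInitB (n : Int) : List (List Int) :=
  let h := PySem.Int.floordiv n 2
  let b0 := (PySem.List.pyRange 0 n 1).map (fun _ => PySem.List.pyRepeat [(0 : Int)] n)
  let b1 := pvSetCell b0 h h 2
  let b2 := pvSetCell b1 (h - 1) (h - 1) 2
  let b3 := pvSetCell b2 (h - 1) h 1
  pvSetCell b3 h (h - 1) 1

-- B's recursive probe 'chain': (found a closing stone?, board after the unwind flips).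
-- The in-bounds run of opponent stones has ≤ n cells, so fuel n+2 never runs out in B's domain.
def pvChain (fuel : Nat) (n : Int) (bd : List (List Int)) (y x dy dx s k : Int) :
    Bool × List (List Int) :=
  match fuel with
  | 0 => (false, bd)
  | f + 1 =>
    if !(decide (0 ≤ y ∧ y < n) && decide (0 ≤ x ∧ x < n)) then (false, bd)
    else
      let c := pvGetCell bd y x
      if c == s then (true, bd)
      else if c == k then
        let r := pvChain f n bd (y + dy) (x + dx) dy dx s k
        if r.1 then (true, pvSetCell r.2 y x s) else (false, r.2)
      else (false, bd)

-- chain is called for its board effect only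
def pvDirB (n k y x s : Int) (bd : List (List Int)) (dy dx : Int) : List (List Int) :=
  (pvChain (n.toNat + 2) n bd (y - 1 + dy) (x - 1 + dx) dy dx s k).2

def pvPlayB (n : Int) (bd : List (List Int)) (x y s : Int) : List (List Int) :=
  let bd := pvSetCell bd (y - 1) (x - 1) s
  let k : Int := if s == 1 then 2 else 1
  [(-1 : Int), 0, 1].foldl (fun bd dy =>
    [(-1 : Int), 0, 1].foldl (fun bd dx =>
      if dy != 0 || dx != 0 then pvDirB n k y x s bd dy dx else bd) bd) bd

def pvCountB (bd : List (List Int)) : Int × Int :=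
  let flat := bd.flatten
  ((flat.count 1 : Int), (flat.count 2 : Int))

def solution_alt (n : Int) (plays : List (Int × Int × Int)) : Int × Int :=
  pvCountB (plays.foldl (fun bd p => pvPlayB n bd p.1 p.2.1 p.2.2) (pvBoardInitB n))

-- ===== PRECONDITION & SPEC =====
-- Pre_ excludes exactly the inputs on which the Python A raises IndexError: n ≤ 0 (the initial
-- four centre assignments hit an empty board) or a played coordinate whose index y-1 / x-1
-- falls outside Python's accepted range [-n, n) for the n×n board.
def Pre_solution (n : Int) (plays : List (Int × Int × Int)) : Prop :=
  1 ≤ n ∧ plays.all (fun p =>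
    decide (-n ≤ p.2.1 - 1 ∧ p.2.1 - 1 < n ∧ -n ≤ p.1 - 1 ∧ p.1 - 1 < n)) = true
instance (n : Int) (plays : List (Int × Int × Int)) : Decidable (Pre_solution n plays) := by
  unfold Pre_solution; infer_instance

def pvWitness_solution : Int × (List (Int × Int × Int)) := (4, [(3, 2, 2), (1, 1, 1)])

def Spec_solution (n : Int) (plays : List (Int × Int × Int)) (out : Int × Int) : Prop :=
  out = solution_alt n plays
instance (n : Int) (plays : List (Int × Int × Int)) (out : Int × Int) :
    Decidable (Spec_solution n plays out) := by unfold Spec_solution; infer_instance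

-- ===== CLAIM (what is proved, stated in full; the proofs are below) =====
def Claim_equal_solution : Prop := ∀ (n : Int) (plays : List (Int × Int × Int)),
  Dom_solution n plays → Pre_solution n plays → Spec_solution n plays (solution n plays)

-- ===== LEMMAS AND PROOFS =====

-- normalised Python index: 'some k' iff the subscript lands at position k
def pvNorm (len : Nat) (i : Int) : Option Nat :=
  if 0 ≤ i then (if i < (len : Int) then some i.toNat else none)
  else (if -(len : Int) ≤ i then some (len - (-i).toNat) else none)

lemma pvNorm_lt {len : Nat} {i : Int} {k : Nat} (h : pvNorm len i = some k) : k < len := by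
  unfold pvNorm at h
  split_ifs at h <;> simp_all <;> omega

lemma pv_pySetD_norm {a : Type} (xs : List a) (i : Int) (v : a) :
    PySem.List.pySetD xs i v =
      (match pvNorm xs.length i with
       | some k => xs.set k v
       | none => xs) := by
  simp only [PySem.List.pySetD, PySem.List.pySet?, PySem.List.pyIdx?, pvNorm]
  split_ifs <;> simp

lemma pv_pyGetD_norm {a : Type} (xs : List a) (i : Int) (d : a) :
    PySem.List.pyGetD xs i d =
      (match pvNorm xs.length i with
       | some k => xs.getD k d
       | none => d) := by
  simp only [PySem.List.pyGetD, PySem.List.pyGet?, PySem.List.pyIdx?, pvNorm]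
  split_ifs <;> simp [List.getD]

lemma pv_setCell_eq (bd : List (List Int)) (y x v : Int) :
    pvSetCell bd y x v =
      (match pvNorm bd.length y with
       | some j => bd.set j (PySem.List.pySetD (bd.getD j []) x v)
       | none => bd) := by
  unfold pvSetCell
  rw [pv_pyGetD_norm, pv_pySetD_norm]
  cases h : pvNorm bd.length y <;> simp

-- A's walk only appends to its stack accumulator
lemma pv_walkA_acc (f : Nat) (n : Int) (bd : List (List Int)) (k dy dx : Int) :
    ∀ (ny nx : Int) (acc : List (Int × Int)),
    pvWalkA f n bd k ny nx dy dx acc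
      = (acc ++ (pvWalkA f n bd k ny nx dy dx []).1, (pvWalkA f n bd k ny nx dy dx []).2) := by
  induction f with
  | zero => intro ny nx acc; simp [pvWalkA]
  | succ f ih =>
    intro ny nx acc
    simp only [pvWalkA]
    by_cases h : (pvIsOut n nx ny && (pvGetCell bd ny nx == k)) = true
    · rw [if_pos h, if_pos h, ih (ny + dy) (nx + dx) (acc ++ [(ny, nx)]),
        ih (ny + dy) (nx + dx) ([] ++ [(ny, nx)])]
      simp
    · simp [h]

-- one-step unfolding of the probe (definitional)
lemma pvChain_succ (f : Nat) (n : Int) (bd : List (List Int)) (y x dy dx s k : Int) :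
    pvChain (f + 1) n bd y x dy dx s k =
      (if !(decide (0 ≤ y ∧ y < n) && decide (0 ≤ x ∧ x < n)) then (false, bd)
       else if pvGetCell bd y x == s then (true, bd)
       else if pvGetCell bd y x == k then
         (if (pvChain f n bd (y + dy) (x + dx) dy dx s k).1 then
            (true, pvSetCell (pvChain f n bd (y + dy) (x + dx) dy dx s k).2 y x s)
          else (false, (pvChain f n bd (y + dy) (x + dx) dy dx s k).2))
       else (false, bd)) := rfl

-- the heart of the equivalence: B's recursive probe with one extra unit of fuel returns
-- (A's closing test at the walk's endpoint, and A's popped-stack flips when it succeeds)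
lemma pv_chain_walk (n : Int) (bd : List (List Int)) (k dy dx s : Int) (hks : k ≠ s) :
    ∀ (f : Nat) (ny nx : Int),
    pvChain (f + 1) n bd ny nx dy dx s k =
      (let r := pvWalkA f n bd k ny nx dy dx [];
       let ok := pvIsOut n r.2.2 r.2.1 && (pvGetCell bd r.2.1 r.2.2 == s);
       (ok, if ok then r.1.reverse.foldl (fun b p => pvSetCell b p.1 p.2 s) bd else bd)) := by
  intro f
  induction f with
  | zero =>
    intro ny nx
    rw [pvChain_succ]
    simp only [pvWalkA, List.reverse_nil, List.foldl_nil, ite_self]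
    by_cases hb : (decide (0 ≤ ny ∧ ny < n) && decide (0 ≤ nx ∧ nx < n)) = true
    · rw [if_neg (by simpa using hb)]
      by_cases hs : (pvGetCell bd ny nx == s) = true
      · rw [if_pos hs]
        simp only [pvIsOut]
        rw [hb, hs]
        simp
      · rw [if_neg (by simp [hs])]
        have h0 : pvChain 0 n bd (ny + dy) (nx + dx) dy dx s k = (false, bd) := rfl
        rw [h0]
        simp only [pvIsOut]
        rw [hb]
        simp [hs]
    · have hbf : (decide (0 ≤ ny ∧ ny < n) && decide (0 ≤ nx ∧ nx < n)) = false :=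
        Bool.eq_false_iff.mpr hb
      rw [if_pos (by simp at hbf ⊢; omega)]
      simp only [pvIsOut]
      rw [hbf]
      simp
  | succ f ih =>
    intro ny nx
    rw [pvChain_succ]
    by_cases hg : (pvIsOut n nx ny && (pvGetCell bd ny nx == k)) = true
    · have hb : (decide (0 ≤ ny ∧ ny < n) && decide (0 ≤ nx ∧ nx < n)) = true :=
        (Bool.and_eq_true _ _).mp hg |>.1
      have hk : (pvGetCell bd ny nx == k) = true := ((Bool.and_eq_true _ _).mp hg).2
      have hck : pvGetCell bd ny nx = k := by simpa using hk
      have hcs : (pvGetCell bd ny nx == s) = false := by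
        rw [hck]; exact beq_eq_false_iff_ne.mpr hks
      simp only [hb, hk, hcs, Bool.not_true, Bool.false_eq_true, if_false, if_true]
      rw [ih (ny + dy) (nx + dx)]
      conv_rhs => rw [pvWalkA]
      rw [if_pos hg, pv_walkA_acc f n bd k dy dx (ny + dy) (nx + dx) ([] ++ [(ny, nx)])]
      simp only [List.nil_append, List.reverse_append, List.reverse_cons, List.reverse_nil,
        List.nil_append, List.foldl_append, List.foldl_cons, List.foldl_nil]
      by_cases hok : (pvIsOut n (pvWalkA f n bd k (ny + dy) (nx + dx) dy dx []).2.2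
            (pvWalkA f n bd k (ny + dy) (nx + dx) dy dx []).2.1
          && (pvGetCell bd (pvWalkA f n bd k (ny + dy) (nx + dx) dy dx []).2.1
              (pvWalkA f n bd k (ny + dy) (nx + dx) dy dx []).2.2 == s)) = true
      · simp [hok]
      · simp [hok]
    · -- guard fails: the walk stops here, the probe decides on this cell
      conv_rhs => rw [pvWalkA]
      rw [if_neg hg]
      simp only [List.reverse_nil, List.foldl_nil, ite_self]
      by_cases hb : (decide (0 ≤ ny ∧ ny < n) && decide (0 ≤ nx ∧ nx < n)) = true
      · have hkf : (pvGetCell bd ny nx == k) = false := by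
          rcases Bool.eq_false_or_eq_true (pvGetCell bd ny nx == k) with h | h
          · exact absurd (show (pvIsOut n nx ny && (pvGetCell bd ny nx == k)) = true by
              simp [pvIsOut, h]; simpa using hb) hg
          · exact h
        rw [if_neg (by simpa using hb)]
        by_cases hs : (pvGetCell bd ny nx == s) = true
        · rw [if_pos hs]
          simp only [pvIsOut]
          rw [hb, hs]
          simp
        · rw [if_neg (by simp [hs]), if_neg (by simp [hkf])]
          simp only [pvIsOut]
          rw [hb]
          simp [hs]
      · have hbf : (decide (0 ≤ ny ∧ ny < n) && decide (0 ≤ nx ∧ nx < n)) = false :=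
          Bool.eq_false_iff.mpr hb
        rw [if_pos (by simp at hbf ⊢; omega)]
        simp only [pvIsOut]
        rw [hbf]
        simp

-- the two per-direction bodies agree
lemma pv_dir_eq (n k y x s dy dx : Int) (bd : List (List Int)) (hks : k ≠ s) :
    pvDirA n k y x s bd dy dx = pvDirB n k y x s bd dy dx := by
  have hyx : y + dy - 1 = y - 1 + dy := by ring
  have hxx : x + dx - 1 = x - 1 + dx := by ring
  simp only [pvDirA, pvDirB, hyx, hxx]
  rw [show n.toNat + 2 = (n.toNat + 1) + 1 from rfl,
    pv_chain_walk n bd k dy dx s hks (n.toNat + 1) (y - 1 + dy) (x - 1 + dx)]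

-- the two per-play bodies agree: both visit the eight directions in the same order
lemma pv_play_eq (n : Int) (bd : List (List Int)) (x y s : Int) :
    pvPlayA n bd x y s = pvPlayB n bd x y s := by
  have hr : PySem.List.pyRange 0 8 1 = [0, 1, 2, 3, 4, 5, 6, 7] := by decide
  simp only [pvPlayA, pvPlayB, hr, List.foldl_cons, List.foldl_nil]
  set K : Int := (if s == 1 then (2 : Int) else 1) with hK
  have hks : K ≠ s := by
    rw [hK]
    by_cases h : s = 1
    · simp [h]
    · simp [h]
      omega
  have hd : ∀ (b : List (List Int)) (dy dx : Int),
      pvDirA n K y x s b dy dx = pvDirB n K y x s b dy dx :=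
    fun b dy dx => pv_dir_eq n K y x s dy dx b hks
  simp [PySem.List.pyGetD, PySem.List.pyGet?, PySem.List.pyIdx?, pvDy, pvDx, hd]

-- the two board initialisations perform the same four writes
lemma pv_init_eq (n : Int) : pvBoardInit n = pvBoardInitB n := by
  simp [pvBoardInit, pvBoardInitB, PySem.List.enumerate_cons, PySem.List.enumerate_nil]

-- board shape: square, every row as long as the board
def pvShape (m : Nat) (bd : List (List Int)) : Prop :=
  bd.length = m ∧ ∀ r ∈ bd, r.length = m

lemma pv_shape_set (m : Nat) (bd : List (List Int)) (y x v : Int) (h : pvShape m bd) :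
    pvShape m (pvSetCell bd y x v) := by
  obtain ⟨hl, hr⟩ := h
  rw [pv_setCell_eq]
  cases hn : pvNorm bd.length y with
  | none => exact ⟨hl, hr⟩
  | some j =>
    have hj : j < bd.length := pvNorm_lt hn
    refine ⟨by simpa using hl, ?_⟩
    intro r hrmem
    rcases List.mem_or_eq_of_mem_set hrmem with hmem | heq
    · exact hr r hmem
    · subst heq
      rw [PySem.List.length_pySetD, List.getD_eq_getElem _ _ hj]
      exact hr _ (List.getElem_mem _)

lemma pv_shape_init (n : Int) : pvShape n.toNat (pvBoardInitB n) := by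
  have h0 : pvShape n.toNat
      ((PySem.List.pyRange 0 n 1).map (fun _ => PySem.List.pyRepeat [(0 : Int)] n)) := by
    constructor
    · simp [PySem.List.length_pyRange_one]
    · intro r hr
      rcases List.mem_map.mp hr with ⟨_, _, rfl⟩
      simp [PySem.List.pyRepeat_singleton]
  unfold pvBoardInitB
  exact pv_shape_set _ _ _ _ _ (pv_shape_set _ _ _ _ _ (pv_shape_set _ _ _ _ _
    (pv_shape_set _ _ _ _ _ h0)))

lemma pv_shape_chain (m : Nat) (n dy dx s k : Int) :
    ∀ (f : Nat) (bd : List (List Int)) (y x : Int), pvShape m bd →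
      pvShape m (pvChain f n bd y x dy dx s k).2 := by
  intro f
  induction f with
  | zero => intro bd y x h; exact h
  | succ f ih =>
    intro bd y x h
    rw [pvChain_succ]
    by_cases h1 : (!(decide (0 ≤ y ∧ y < n) && decide (0 ≤ x ∧ x < n))) = true
    · rw [if_pos h1]; exact h
    · rw [if_neg h1]
      by_cases h2 : (pvGetCell bd y x == s) = true
      · rw [if_pos h2]; exact h
      · rw [if_neg h2]
        by_cases h3 : (pvGetCell bd y x == k) = true
        · rw [if_pos h3]
          by_cases h4 : (pvChain f n bd (y + dy) (x + dx) dy dx s k).1 = true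
          · rw [if_pos h4]
            exact pv_shape_set _ _ _ _ _ (ih bd (y + dy) (x + dx) h)
          · rw [if_neg h4]
            exact ih bd (y + dy) (x + dx) h
        · rw [if_neg h3]; exact h

lemma pv_fold_pres {a b : Type} (P : b → Prop) (f : b → a → b)
    (hf : ∀ acc e, P acc → P (f acc e)) :
    ∀ (l : List a) (acc : b), P acc → P (l.foldl f acc) := by
  intro l
  induction l with
  | nil => exact fun acc h => h
  | cons e t ih => exact fun acc h => ih _ (hf acc e h)

lemma pv_shape_play (m : Nat) (n : Int) (bd : List (List Int)) (x y s : Int)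
    (h : pvShape m bd) : pvShape m (pvPlayB n bd x y s) := by
  simp only [pvPlayB]
  refine pv_fold_pres (pvShape m) _ ?_ _ _ (pv_shape_set _ _ _ _ _ h)
  intro acc dy hacc
  refine pv_fold_pres (pvShape m) _ ?_ _ _ hacc
  intro acc' dx hacc'
  by_cases hc : (dy != 0 || dx != 0) = true
  · rw [if_pos hc]
    exact pv_shape_chain m n dy dx s _ _ acc' _ _ hacc'
  · rw [if_neg hc]
    exact hacc'

-- fold over range-with-subscript is a fold over the list itself
lemma pv_fold_range_getD {a b : Type} (l : List a) (d : a) (f : b → a → b) (acc : b) :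
    (List.range l.length).foldl (fun w k => f w (l.getD k d)) acc = l.foldl f acc := by
  induction l using List.reverseRecOn generalizing acc with
  | nil => simp
  | append_singleton l' e ih =>
    rw [List.length_append, List.length_singleton, List.range_succ, List.foldl_append,
      List.foldl_append]
    have hmid : (l' ++ [e]).getD l'.length d = e := by
      rw [List.getD_eq_getElem _ _ (by simp)]
      simp
    have hpre : (List.range l'.length).foldl (fun w k => f w ((l' ++ [e]).getD k d)) acc
        = (List.range l'.length).foldl (fun w k => f w (l'.getD k d)) acc := by
      apply PySem.List.foldl_congr_mem
      intro w k hk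
      have hklt : k < l'.length := List.mem_range.mp hk
      rw [List.getD_eq_getElem _ _ (by simp; omega), List.getD_eq_getElem _ _ hklt]
      simp [List.getElem_append_left hklt]
    rw [hpre, ih]
    simp only [List.foldl_cons, List.foldl_nil, hmid]

-- one row of A's tally loop is a pair of row counts
lemma pv_row_count (r : List Int) :
    ∀ wb : Int × Int,
    r.foldl (fun wb c => if c == 1 then (wb.1 + 1, wb.2)
      else if c == 2 then (wb.1, wb.2 + 1) else wb) wb
      = (wb.1 + (r.count 1 : Int), wb.2 + (r.count 2 : Int)) := by
  induction r with
  | nil => intro wb; simp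
  | cons c t ih =>
    intro wb
    rw [List.foldl_cons, ih]
    by_cases h1 : c = 1
    · subst h1; simp; omega
    · by_cases h2 : c = 2
      · subst h2; simp; omega
      · simp [h1, h2]

-- folding row-count pairs over the rows is counting in the flattened board
lemma pv_fold_flat_count (bd : List (List Int)) :
    ∀ (a b0 : Int),
    bd.foldl (fun (wb : Int × Int) (r : List Int) =>
        (wb.1 + (r.count 1 : Int), wb.2 + (r.count 2 : Int))) (a, b0)
      = (a + (bd.flatten.count 1 : Int), b0 + (bd.flatten.count 2 : Int)) := by
  induction bd with
  | nil => intro a b0; simp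
  | cons r t ih =>
    intro a b0
    rw [List.foldl_cons, ih]
    simp [List.count_append]
    omega

-- counting: A's doubly indexed scan equals B's flattened count on a square board
lemma pv_count_eq (m : Nat) (bd : List (List Int)) (h : pvShape m bd) :
    pvCalStone bd = pvCountB bd := by
  obtain ⟨hl, hr⟩ := h
  simp only [pvCalStone, pvCountB, pvGetCell, PySem.List.len_eq]
  rw [PySem.List.pyRange_zero_nat]
  simp only [List.foldl_map, PySem.List.pyGetD_natCast]
  have hinner : ∀ (wb : Int × Int), ∀ y ∈ List.range bd.length,
      (List.range bd.length).foldl (fun wb x =>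
        if (bd.getD y []).getD x 0 == 1 then (wb.1 + 1, wb.2)
        else if (bd.getD y []).getD x 0 == 2 then (wb.1, wb.2 + 1) else wb) wb
      = (fun (wb : Int × Int) (y : Nat) =>
          (wb.1 + ((bd.getD y []).count 1 : Int), wb.2 + ((bd.getD y []).count 2 : Int))) wb y := by
    intro wb y hy
    have hylt : y < bd.length := List.mem_range.mp hy
    have hrow : (bd.getD y []).length = bd.length := by
      rw [List.getD_eq_getElem _ _ hylt, hl, hr _ (List.getElem_mem _)]
    simp only
    rw [show bd.length = (bd.getD y []).length from hrow.symm,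
      pv_fold_range_getD (bd.getD y []) 0
        (fun (wb : Int × Int) (c : Int) => if c == 1 then (wb.1 + 1, wb.2)
          else if c == 2 then (wb.1, wb.2 + 1) else wb) wb,
      pv_row_count]
  rw [PySem.List.foldl_congr_mem _ _ _ _ hinner]
  rw [pv_fold_range_getD bd []
      (fun (wb : Int × Int) (r : List Int) =>
        (wb.1 + (r.count 1 : Int), wb.2 + (r.count 2 : Int))) ((0 : Int), (0 : Int))]
  rw [pv_fold_flat_count]
  simp

-- ===== VERDICT (by name: the statement is the Claim_ definition above) =====
theorem solution_spec : Claim_equal_solution := by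
  intro n plays _ _
  unfold Spec_solution solution solution_alt
  rw [pv_init_eq]
  have hb : plays.foldl (fun bd p => pvPlayA n bd p.1 p.2.1 p.2.2) (pvBoardInitB n)
      = plays.foldl (fun bd p => pvPlayB n bd p.1 p.2.1 p.2.2) (pvBoardInitB n) := by
    apply PySem.List.foldl_congr_mem
    intro bd p _
    exact pv_play_eq n bd p.1 p.2.1 p.2.2
  rw [hb]
  apply pv_count_eq n.toNat
  exact pv_fold_pres (pvShape n.toNat) _
    (fun bd p h => pv_shape_play _ _ _ _ _ _ h) plays _ (pv_shape_init n)
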